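-- pv_equiv track=rewrite | github.com/Nadben/Projet-Poker | poker_deux_joueurs.py | doublePair
-- ===== SOURCE A (Python) =====
-- def doublePair(cartes_joueur,cartes_devoile):
--     reultat,i = 0,0
--     dic={}
--     resultat,full = 0,0
--
--     for m,n in cartes_devoile:
--         dic[m] = dic.get(m,0) + 1
--
--
--     for g,h in dic.items():
--         if( h>=2 ):
--             i+=1
--
--     if(i >= 2 ):
--         resultat = 1
--
--     return resultat
-- ===== SOURCE B (Python) =====
-- def doublePair(cartes_joueur, cartes_devoile):
--     # Sort the revealed ranks, then one pass over runs of equal adjacent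
--     # ranks; count runs of length >= 2 instead of building a frequency dict.
--     ranks = sorted(m for m, n in cartes_devoile)
--     pairs = 0
--     i, n = 0, len(ranks)
--     while i < n:
--         j = i + 1
--         while j < n and ranks[j] == ranks[i]:
--             j += 1
--         if j - i >= 2:
--             pairs += 1
--         i = j
--     return 1 if pairs >= 2 else 0
-- ===== Notes on version B (the rewrite author's own statement) =====
-- stated objective: alternative
-- what changed: Replaces the frequency dict plus items() scan by sort-then-scan: the revealed ranks are sorted and a single run-walk over adjacent equal ranks counts runs of length >= 2.
import Mathlib
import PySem

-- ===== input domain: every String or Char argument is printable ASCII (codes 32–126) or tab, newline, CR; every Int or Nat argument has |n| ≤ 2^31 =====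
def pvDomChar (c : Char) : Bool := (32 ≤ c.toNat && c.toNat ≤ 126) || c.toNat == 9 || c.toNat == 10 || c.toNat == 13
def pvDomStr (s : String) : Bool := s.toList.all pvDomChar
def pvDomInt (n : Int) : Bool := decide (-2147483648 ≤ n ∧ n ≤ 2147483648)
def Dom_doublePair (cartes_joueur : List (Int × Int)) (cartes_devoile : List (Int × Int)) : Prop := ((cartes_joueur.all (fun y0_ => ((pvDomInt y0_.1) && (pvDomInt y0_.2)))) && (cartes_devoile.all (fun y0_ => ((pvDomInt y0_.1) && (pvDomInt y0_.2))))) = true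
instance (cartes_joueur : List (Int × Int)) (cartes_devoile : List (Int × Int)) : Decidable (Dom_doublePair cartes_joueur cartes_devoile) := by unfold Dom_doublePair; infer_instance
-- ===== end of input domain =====

-- B replaces A's frequency dict + items() scan by sort-then-scan over runs of equal adjacent ranks (alternative algorithm, not faster).

-- ===== PORT A =====
def doublePair (cartes_joueur : List (Int × Int)) (cartes_devoile : List (Int × Int)) : Int :=
  -- reultat, full are dead variables in A; the dict-counting loop, the items() scan and the final test are ported 1:1
  let dic : PySem.Dict Int Int :=
    cartes_devoile.foldl (fun d p => d.insert p.1 (d.getD p.1 0 + 1)) PySem.Dict.empty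
  let i : Int := dic.items.foldl (fun i p => if p.2 ≥ 2 then i + 1 else i) 0
  if i ≥ 2 then 1 else 0

-- ===== PORT B =====
-- B's inner while loop 'advance j while ranks[j] == ranks[i]' is the takeWhile run;
-- the outer while loop 'i = j' is the recursion on the dropWhile remainder.
def countPairRuns : List Int → Int
  | [] => 0
  | x :: xs =>
    (if ((xs.takeWhile (fun y => y == x)).length : Int) + 1 ≥ 2 then 1 else 0)
      + countPairRuns (xs.dropWhile (fun y => y == x))
termination_by l => l.length
decreasing_by
  exact Nat.lt_succ_of_le (List.Sublist.length_le (List.dropWhile_sublist _))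

def doublePair_alt (cartes_joueur : List (Int × Int)) (cartes_devoile : List (Int × Int)) : Int :=
  let ranks : List Int := PySem.List.sorted (cartes_devoile.map (fun p => p.1)) (fun x => x) false
  if countPairRuns ranks ≥ 2 then 1 else 0

-- ===== PRECONDITION & SPEC =====
def Spec_doublePair (cartes_joueur : List (Int × Int)) (cartes_devoile : List (Int × Int)) (out : Int) : Prop := out = doublePair_alt cartes_joueur cartes_devoile
instance (cartes_joueur : List (Int × Int)) (cartes_devoile : List (Int × Int)) (out : Int) : Decidable (Spec_doublePair cartes_joueur cartes_devoile out) := by unfold Spec_doublePair; infer_instance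

-- ===== CLAIM (what is proved, stated in full; the proofs are below) =====
def Claim_equal_doublePair : Prop := ∀ (cartes_joueur : List (Int × Int)) (cartes_devoile : List (Int × Int)), Dom_doublePair cartes_joueur cartes_devoile → Spec_doublePair cartes_joueur cartes_devoile (doublePair cartes_joueur cartes_devoile)

-- ===== LEMMAS AND PROOFS =====

-- on a ≤-sorted list, countPairRuns counts the distinct elements of multiplicity ≥ 2
theorem countPairRuns_sorted :
    ∀ (l : List Int), l.Pairwise (· ≤ ·) →
      countPairRuns l = ((PySem.List.dedup l).countP (fun r => decide (2 ≤ l.count r)) : Int) := by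
  intro l
  induction l using countPairRuns.induct with
  | case1 => intro _; simp [countPairRuns, PySem.List.dedup]
  | case2 x xs ih =>
    intro h
    have hxle : ∀ y ∈ xs, x ≤ y := (List.pairwise_cons.mp h).1
    have hxs : xs.Pairwise (· ≤ ·) := (List.pairwise_cons.mp h).2
    set t := xs.takeWhile (fun y => y == x) with ht
    set d := xs.dropWhile (fun y => y == x) with hd
    have htd : t ++ d = xs := List.takeWhile_append_dropWhile
    have htx : ∀ y ∈ t, y = x := fun y hy =>
      eq_of_beq (List.mem_takeWhile_imp (p := fun y => y == x) (l := xs) (ht ▸ hy))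
    have hdsub : d.Sublist xs := List.dropWhile_sublist _
    have hdpw : d.Pairwise (· ≤ ·) := hxs.sublist hdsub
    have hdx : ∀ y ∈ d, y ≠ x := by
      cases hdc : d with
      | nil => simp
      | cons y ys =>
        have hne : d ≠ [] := by rw [hdc]; simp
        have hyne : (y == x) = false := by
          have heq : List.dropWhile (fun y => y == x) xs = y :: ys := hd.symm.trans hdc
          have := List.head_dropWhile_not (fun y => y == x) (l := xs) (w := by rw [heq]; simp)
          simpa [heq] using this
        have hylt : x < y := by
          have hyxs : y ∈ xs := hdsub.mem (by rw [hdc]; simp)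
          have h1 := hxle y hyxs
          have h2 : y ≠ x := by simpa using hyne
          omega
        intro z hz
        rcases List.mem_cons.mp hz with rfl | hzys
        · omega
        · have : y ≤ z := (List.pairwise_cons.mp (hdc ▸ hdpw)).1 z hzys
          omega
    -- counts
    have hcx : (x :: xs).count x = 1 + t.length := by
      rw [← htd]
      have h1 : t.count x = t.length := List.count_eq_length.mpr (by
        intro y hy; exact ((htx y hy) ▸ rfl))
      have h2 : d.count x = 0 := List.count_eq_zero.mpr (by
        intro hmem; exact hdx x hmem rfl)
      simp [List.count_append, h1, h2]
      omega
    have hcr : ∀ r : Int, r ≠ x → (x :: xs).count r = d.count r := by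
      intro r hr
      rw [← htd]
      have h1 : t.count r = 0 := List.count_eq_zero.mpr (fun hmem => hr (htx r hmem))
      simp [List.count_cons, List.count_append, h1]
      omega
    -- dedup of the whole list is (as a permutation) x on top of dedup of the remainder
    have hxnd : x ∉ PySem.List.dedup d := by
      rw [PySem.List.mem_dedup]; intro hm; exact hdx x hm rfl
    have hperm : (PySem.List.dedup (x :: xs)).Perm (x :: PySem.List.dedup d) := by
      apply (List.perm_ext_iff_of_nodup (PySem.List.nodup_dedup _) ?_).mpr
      · intro r
        rw [PySem.List.mem_dedup, List.mem_cons, List.mem_cons, PySem.List.mem_dedup, ← htd,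
          List.mem_append]
        constructor
        · rintro (rfl | hr | hr)
          · exact Or.inl rfl
          · exact Or.inl (htx r hr)
          · exact Or.inr hr
        · rintro (rfl | hr)
          · exact Or.inl rfl
          · exact Or.inr (Or.inr hr)
      · exact List.nodup_cons.mpr ⟨hxnd, PySem.List.nodup_dedup _⟩
    rw [countPairRuns, ih hdpw, hperm.countP_eq]
    have hcongr : (PySem.List.dedup d).countP (fun r => decide (2 ≤ (x :: xs).count r))
        = (PySem.List.dedup d).countP (fun r => decide (2 ≤ d.count r)) := by
      apply List.countP_congr
      intro r hr
      have : r ≠ x := fun hrx => (hxnd (hrx ▸ hr))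
      rw [hcr r this]
    rw [List.countP_cons, hcongr, hcx]
    simp only [← ht, decide_eq_true_eq]
    push_cast
    split_ifs <;> omega

-- A's counting loop 'if h >= 2: i += 1' is n + countP
theorem foldl_count_if {α : Type} (p : α → Prop) [DecidablePred p] :
    ∀ (l : List α) (n : Int), l.foldl (fun i x => if p x then i + 1 else i) n
      = n + l.countP (fun x => decide (p x)) := by
  intro l
  induction l with
  | nil => intro n; simp
  | cons x xs ih =>
    intro n
    by_cases h : p x <;> simp [h, ih] <;> ring

theorem doublePair_eq_alt (cj cd : List (Int × Int)) : doublePair cj cd = doublePair_alt cj cd := by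
  unfold doublePair doublePair_alt
  have hdic : cd.foldl (fun d p => d.insert p.1 (d.getD p.1 0 + 1)) PySem.Dict.empty
      = PySem.Dict.counter (cd.map (fun p => p.1)) := by
    rw [← PySem.Dict.foldl_insert_getD_add_one_eq_counter, List.foldl_map]
  set ranks := cd.map (fun p => p.1) with hranks
  set S := PySem.List.sorted ranks (fun x => x) false with hS
  have hperm : S.Perm ranks := PySem.List.sorted_perm _ _ _
  have hpair : S.Pairwise (· ≤ ·) := by
    have := PySem.List.sorted_pairwise (xs := ranks) (key := fun x => x)
    simpa using this
  have hB := countPairRuns_sorted S hpair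
  have hkey : (PySem.List.dedup S).countP (fun r => decide (2 ≤ S.count r))
      = (PySem.Set.ofList ranks).countP (fun k => decide ((ranks.count k : Int) ≥ 2)) := by
    have hmem : ∀ r, r ∈ PySem.List.dedup S ↔ r ∈ PySem.Set.ofList ranks := by
      intro r; rw [PySem.List.mem_dedup, PySem.Set.mem_ofList, hperm.mem_iff]
    have hp : (PySem.List.dedup S).Perm (PySem.Set.ofList ranks) :=
      (List.perm_ext_iff_of_nodup (PySem.List.nodup_dedup _) (PySem.Set.nodup_ofList _)).mpr hmem
    rw [hp.countP_eq]
    apply List.countP_congr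
    intro r _
    rw [hperm.count_eq]
    simp only [decide_eq_true_eq]
    omega
  simp only [hdic, PySem.Dict.items_counter,
    foldl_count_if (fun q : Int × Int => q.2 ≥ 2), List.countP_map, hB, hkey]
  simp [Function.comp_def]

-- ===== VERDICT (by name: the statement is the Claim_ definition above) =====
theorem doublePair_spec : Claim_equal_doublePair := by
  intro cj cd _
  exact doublePair_eq_alt cj cd
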